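-- pv_equiv track=rewrite | github.com/dwyaneyao/RTV-Text-Extractor | rtv_text_extractor.py | iter_call_string_arguments
-- ===== SOURCE A (Python) =====
-- from typing import Callable, Iterable
--
-- def scan_string_literal(text: str, start_index: int, delimiter: str) -> tuple[str, int] | None:
--     i = start_index + 1
--     escaped = False
--     while i < len(text):
--         ch = text[i]
--         if escaped:
--             escaped = False
--             i += 1
--             continue
--         if ch == "\\":
--             escaped = True
--             i += 1
--             continue
--         if ch == delimiter:
--             return text[start_index + 1 : i], i + 1
--         i += 1
--     return None
--
-- def iter_call_string_arguments(block: str) -> Iterable[tuple[int, str]]: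
--     open_paren = block.find("(")
--     if open_paren < 0:
--         return []
--
--     arg_index = 0
--     depth = 1
--     i = open_paren + 1
--     results: list[tuple[int, str]] = []
--     while i < len(block):
--         ch = block[i]
--         if ch in ("'", '"'):
--             parsed = scan_string_literal(block, i, ch)
--             if not parsed:
--                 break
--             literal, end_index = parsed
--             if depth == 1:
--                 results.append((arg_index, literal))
--             i = end_index
--             continue
--         if ch == "(":
--             depth += 1
--         elif ch == ")":
--             depth -= 1
--             if depth <= 0:
--                 break
--         elif ch == "," and depth == 1:
--             arg_index += 1
--         i += 1
--     return results
-- ===== SOURCE B (Python) =====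
-- def _tokenize(block, i):
--     # Pass 1: turn the text after the opening paren into a flat token list.
--     tokens = []
--     n = len(block)
--     while i < n:
--         ch = block[i]
--         if ch == "'" or ch == '"':
--             j = i + 1
--             escaped = False
--             end = -1
--             while j < n:
--                 c = block[j]
--                 if escaped:
--                     escaped = False
--                 elif c == "\\":
--                     escaped = True
--                 elif c == ch:
--                     end = j
--                     break
--                 j += 1
--             if end < 0:
--                 tokens.append(("bad", ""))
--                 return tokens
--             tokens.append(("str", block[i + 1 : end]))
--             i = end + 1
--         else:
--             if ch == "(":
--                 tokens.append(("open", ""))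
--             elif ch == ")":
--                 tokens.append(("close", ""))
--             elif ch == ",":
--                 tokens.append(("comma", ""))
--             i += 1
--     return tokens
--
-- def iter_call_string_arguments(block: str):
--     open_paren = block.find("(")
--     if open_paren < 0:
--         return []
--     # Pass 2: fold over the token stream, tracking depth and argument index.
--     results = []
--     depth = 1
--     arg_index = 0
--     for kind, payload in _tokenize(block, open_paren + 1):
--         if kind == "str":
--             if depth == 1:
--                 results.append((arg_index, payload))
--         elif kind == "open":
--             depth += 1
--         elif kind == "close":
--             depth -= 1
--             if depth <= 0:
--                 break
--         elif kind == "comma":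
--             if depth == 1:
--                 arg_index += 1
--         else:
--             break
--     return results
-- ===== Notes on version B (the rewrite author's own statement) =====
-- stated objective: alternative
-- what changed: Replaced A's single scanner-with-helper by two staged passes: a tokenizer that first turns the text after the opening paren into a flat token list (string literals, parens, commas), then a separate fold over that token stream tracking depth and argument index; same cost, different structure.
import Mathlib
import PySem

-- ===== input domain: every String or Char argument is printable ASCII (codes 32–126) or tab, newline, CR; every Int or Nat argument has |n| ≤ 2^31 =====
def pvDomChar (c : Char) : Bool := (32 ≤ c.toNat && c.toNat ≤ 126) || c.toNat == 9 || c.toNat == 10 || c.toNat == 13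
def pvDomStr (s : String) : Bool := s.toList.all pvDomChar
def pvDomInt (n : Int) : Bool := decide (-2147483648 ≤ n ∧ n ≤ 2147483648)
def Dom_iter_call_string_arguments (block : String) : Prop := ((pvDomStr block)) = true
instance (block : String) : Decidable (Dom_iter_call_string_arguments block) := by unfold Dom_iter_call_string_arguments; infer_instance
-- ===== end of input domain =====

-- B replaces A's scanner-with-helper by two staged passes: a tokenizer producing a flat
-- token list, then a fold over the tokens tracking depth and argument index (alternative).


-- ===== PORT A =====
-- scan_string_literal: walk from start_index+1 to the first unescaped delimiter; the literal is the
-- Python slice text[start_index+1 : i], exact here as drop/take since the indices are in range.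
-- 'fuel' is a totality device only (one unit per character examined); both ports are run with
-- fuel = length + 1, which is never exhausted (proved fuel-irrelevant below).
def pvScanA (cs : List Char) (start : Nat) : Nat → Nat → Bool → Char → Option (List Char × Nat)
  | 0, _, _, _ => none
  | fuel+1, i, escaped, delim =>
    if h : i < cs.length then
      if escaped then pvScanA cs start fuel (i+1) false delim
      else if cs[i] = '\\' then pvScanA cs start fuel (i+1) true delim
      else if cs[i] = delim then some ((cs.drop (start+1)).take (i - (start+1)), i + 1)
      else pvScanA cs start fuel (i+1) false delim
    else none

def pvLoopA (cs : List Char) : Nat → Nat → Int → Int → List (Int × String) → List (Int × String)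
  | 0, _, _, _, results => results
  | fuel+1, i, argIdx, depth, results =>
    if h : i < cs.length then
      if cs[i] = '\'' ∨ cs[i] = '"' then
        match pvScanA cs i fuel (i+1) false (cs[i]) with
        | none => results
        | some (lit, endIdx) =>
            pvLoopA cs fuel endIdx argIdx depth
              (if depth = 1 then results ++ [(argIdx, String.ofList lit)] else results)
      else if cs[i] = '(' then pvLoopA cs fuel (i+1) argIdx (depth+1) results
      else if cs[i] = ')' then
        if depth - 1 ≤ 0 then results else pvLoopA cs fuel (i+1) argIdx (depth-1) results
      else if cs[i] = ',' ∧ depth = 1 then pvLoopA cs fuel (i+1) (argIdx+1) depth results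
      else pvLoopA cs fuel (i+1) argIdx depth results
    else results

def iter_call_string_arguments (block : String) : List (Int × String) :=
  let openParen := PySem.Str.find block "("
  if openParen < 0 then []
  else pvLoopA block.toList (block.toList.length + 1) (openParen.toNat + 1) 0 1 []

-- ===== PORT B =====
-- token type for pass 1 ("bad" = unterminated string literal)
inductive PvTok
  | tstr : String → PvTok
  | topen : PvTok
  | tclose : PvTok
  | tcomma : PvTok
  | tbad : PvTok
deriving DecidableEq, Repr

-- inner while loop of the tokenizer: index of the closing unescaped delimiter, or none ('end = -1')
def pvScanB (cs : List Char) (delim : Char) : Nat → Nat → Bool → Option Nat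
  | 0, _, _ => none
  | fuel+1, j, escaped =>
    if h : j < cs.length then
      if escaped then pvScanB cs delim fuel (j+1) false
      else if cs[j] = '\\' then pvScanB cs delim fuel (j+1) true
      else if cs[j] = delim then some j
      else pvScanB cs delim fuel (j+1) false
    else none

-- pass 1 (_tokenize); fuel is a totality device only, one unit per character, never exhausted
def pvTokenize (cs : List Char) : Nat → Nat → List PvTok
  | 0, _ => []
  | fuel+1, i =>
    if h : i < cs.length then
      if cs[i] = '\'' ∨ cs[i] = '"' then
        match pvScanB cs (cs[i]) fuel (i+1) false with
        | none => [.tbad]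
        | some e => .tstr (String.ofList ((cs.drop (i+1)).take (e - (i+1)))) :: pvTokenize cs fuel (e+1)
      else
        if cs[i] = '(' then .topen :: pvTokenize cs fuel (i+1)
        else if cs[i] = ')' then .tclose :: pvTokenize cs fuel (i+1)
        else if cs[i] = ',' then .tcomma :: pvTokenize cs fuel (i+1)
        else pvTokenize cs fuel (i+1)
    else []

-- pass 2: the for-loop over the token stream (break = stop recursing)
def pvFoldB : List PvTok → Int → Int → List (Int × String) → List (Int × String)
  | [], _, _, res => res
  | t :: ts, depth, argIdx, res =>
    match t with
    | .tstr s => pvFoldB ts depth argIdx (if depth = 1 then res ++ [(argIdx, s)] else res)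
    | .topen => pvFoldB ts (depth+1) argIdx res
    | .tclose => if depth - 1 ≤ 0 then res else pvFoldB ts (depth-1) argIdx res
    | .tcomma => pvFoldB ts depth (if depth = 1 then argIdx+1 else argIdx) res
    | .tbad => res

def iter_call_string_arguments_alt (block : String) : List (Int × String) :=
  let openParen := PySem.Str.find block "("
  if openParen < 0 then []
  else pvFoldB (pvTokenize block.toList (block.toList.length + 1) (openParen.toNat + 1)) 1 0 []

-- ===== PRECONDITION & SPEC =====
def Spec_iter_call_string_arguments (block : String) (out : List (Int × String)) : Prop := out = iter_call_string_arguments_alt block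
instance (block : String) (out : List (Int × String)) : Decidable (Spec_iter_call_string_arguments block out) := by unfold Spec_iter_call_string_arguments; infer_instance

-- ===== CLAIM (what is proved, stated in full; the proofs are below) =====
def Claim_equal_iter_call_string_arguments : Prop := ∀ (block : String), Dom_iter_call_string_arguments block → Spec_iter_call_string_arguments block (iter_call_string_arguments block)

-- ===== LEMMAS AND PROOFS =====

-- A's scan helper is B's inner while loop plus the slice taken at the found index
theorem pvScanA_eq_scanB (cs : List Char) (start : Nat) (delim : Char) :
    ∀ (f i : Nat) (esc : Bool),
      pvScanA cs start f i esc delim =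
        (pvScanB cs delim f i esc).map
          (fun j => ((cs.drop (start+1)).take (j - (start+1)), j + 1)) := by
  intro f
  induction f with
  | zero => intro i esc; rfl
  | succ n ih =>
      intro i esc
      rw [pvScanA, pvScanB]
      by_cases h : i < cs.length
      · rw [dif_pos h, dif_pos h]
        split_ifs <;> first | simp | apply ih
      · rw [dif_neg h, dif_neg h]; rfl

-- a successful inner scan ends at or after where it started, inside the string
theorem pvScanB_bounds (cs : List Char) (delim : Char) :
    ∀ (f i : Nat) (esc : Bool) (j : Nat),
      pvScanB cs delim f i esc = some j → i ≤ j ∧ j < cs.length := by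
  intro f
  induction f with
  | zero => intro i esc j h; simp [pvScanB] at h
  | succ n ih =>
      intro i esc j h
      rw [pvScanB] at h
      split at h
      · split_ifs at h with h1 h2 h3
        · have := ih _ _ _ h; omega
        · have := ih _ _ _ h; omega
        · simp at h; omega
        · have := ih _ _ _ h; omega
      · simp at h

-- sufficient fuel: the inner scan's result does not depend on the fuel
theorem pvScanB_irrel (cs : List Char) (delim : Char) :
    ∀ (f g i : Nat) (esc : Bool), cs.length < i + f → cs.length < i + g →
      pvScanB cs delim f i esc = pvScanB cs delim g i esc := by
  intro f
  induction f with
  | zero =>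
      intro g i esc hf hg
      cases g with
      | zero => rfl
      | succ m => rw [pvScanB, pvScanB]; rw [dif_neg (by omega)]
  | succ n ih =>
      intro g i esc hf hg
      cases g with
      | zero => rw [pvScanB, pvScanB]; rw [dif_neg (by omega)]
      | succ m =>
          rw [pvScanB, pvScanB]
          by_cases h : i < cs.length
          · rw [dif_pos h, dif_pos h]
            split_ifs <;> first | rfl | (refine ih m _ _ ?_ ?_ <;> omega)
          · rw [dif_neg h, dif_neg h]

-- sufficient fuel: the tokenizer's result does not depend on the fuel
theorem pvTokenize_irrel (cs : List Char) :
    ∀ (f g i : Nat), cs.length < i + f → cs.length < i + g →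
      pvTokenize cs f i = pvTokenize cs g i := by
  intro f
  induction f with
  | zero =>
      intro g i hf hg
      cases g with
      | zero => rfl
      | succ m => rw [pvTokenize, pvTokenize]; rw [dif_neg (by omega)]
  | succ n ih =>
      intro g i hf hg
      cases g with
      | zero => rw [pvTokenize, pvTokenize]; rw [dif_neg (by omega)]
      | succ m =>
          rw [pvTokenize, pvTokenize]
          by_cases h : i < cs.length
          · rw [dif_pos h, dif_pos h]
            by_cases h1 : cs[i] = '\'' ∨ cs[i] = '"'
            · rw [if_pos h1, if_pos h1]
              rw [pvScanB_irrel cs (cs[i]) n m (i+1) false (by omega) (by omega)]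
              cases hs : pvScanB cs (cs[i]) m (i+1) false with
              | none => rfl
              | some e =>
                  have hb := pvScanB_bounds cs (cs[i]) m (i+1) false e hs
                  dsimp only
                  rw [ih m (e+1) (by omega) (by omega)]
            · rw [if_neg h1, if_neg h1]
              split_ifs <;> rw [ih m (i+1) (by omega) (by omega)]
          · rw [dif_neg h, dif_neg h]

-- A's scanner equals the fold over B's token stream (token stream at the canonical fuel)
theorem pvLoopA_eq_foldB (cs : List Char) :
    ∀ (f i : Nat) (a d : Int) (res : List (Int × String)), cs.length < i + f →
      pvLoopA cs f i a d res = pvFoldB (pvTokenize cs (cs.length + 1) i) d a res := by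
  intro f
  induction f with
  | zero =>
      intro i a d res hf
      rw [pvLoopA, pvTokenize]; rw [dif_neg (by omega)]; rfl
  | succ n ih =>
      intro i a d res hf
      rw [pvLoopA, pvTokenize]
      by_cases h : i < cs.length
      · rw [dif_pos h, dif_pos h]
        by_cases h1 : cs[i] = '\'' ∨ cs[i] = '"'
        · rw [if_pos h1, if_pos h1]
          rw [pvScanA_eq_scanB cs i (cs[i]) n (i+1) false]
          rw [pvScanB_irrel cs (cs[i]) n cs.length (i+1) false (by omega) (by omega)]
          cases hs : pvScanB cs (cs[i]) cs.length (i+1) false with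
          | none => rfl
          | some e =>
              have hb := pvScanB_bounds cs (cs[i]) cs.length (i+1) false e hs
              dsimp only [Option.map, pvFoldB]
              rw [pvTokenize_irrel cs cs.length (cs.length + 1) (e+1) (by omega) (by omega)]
              exact ih (e+1) a d _ (by omega)
        · rw [if_neg h1, if_neg h1]
          by_cases h2 : cs[i] = '('
          · rw [if_pos h2, if_pos h2]
            rw [pvTokenize_irrel cs cs.length (cs.length + 1) (i+1) (by omega) (by omega),
              pvFoldB]
            exact ih (i+1) a (d+1) res (by omega)
          · rw [if_neg h2, if_neg h2]
            by_cases h3 : cs[i] = ')'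
            · rw [if_pos h3, if_pos h3, pvFoldB]
              by_cases h4 : d - 1 ≤ 0
              · rw [if_pos h4, if_pos h4]
              · rw [if_neg h4, if_neg h4]
                rw [pvTokenize_irrel cs cs.length (cs.length + 1) (i+1) (by omega) (by omega)]
                exact ih (i+1) a (d-1) res (by omega)
            · rw [if_neg h3, if_neg h3]
              by_cases h5 : cs[i] = ','
              · rw [if_pos h5, pvFoldB]
                rw [pvTokenize_irrel cs cs.length (cs.length + 1) (i+1) (by omega) (by omega)]
                by_cases h6 : d = 1
                · rw [if_pos h6, if_pos (And.intro h5 h6)]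
                  exact ih (i+1) (a+1) d res (by omega)
                · rw [if_neg h6, if_neg (fun hc => h6 hc.2)]
                  exact ih (i+1) a d res (by omega)
              · rw [if_neg h5, if_neg (fun hc : cs[i] = ',' ∧ d = 1 => h5 hc.1)]
                rw [pvTokenize_irrel cs cs.length (cs.length + 1) (i+1) (by omega) (by omega)]
                exact ih (i+1) a d res (by omega)
      · rw [dif_neg h, dif_neg h]; rfl

-- ===== VERDICT (by name: the statement is the Claim_ definition above) =====
theorem iter_call_string_arguments_spec : Claim_equal_iter_call_string_arguments := by
  intro block _
  unfold Spec_iter_call_string_arguments iter_call_string_arguments iter_call_string_arguments_alt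
  dsimp only
  by_cases hp : PySem.Str.find block "(" < 0
  · rw [if_pos hp, if_pos hp]
  · rw [if_neg hp, if_neg hp]
    exact pvLoopA_eq_foldB block.toList (block.toList.length + 1)
      ((PySem.Str.find block "(").toNat + 1) 0 1 [] (by omega)
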